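-- pv_equiv track=rewrite | github.com/kuparchad-gif/nexus-core | app/anynode/app/src/viren_alexandria.py | generate_knowledge_response
-- ===== SOURCE A (Python) =====
-- from typing import Dict, List
--
-- def generate_knowledge_response(query: str, relevant_knowledge: List[Dict]) -> str:
--     """Generate VIREN's intelligent response based on his knowledge"""
--
--     if not relevant_knowledge:
--         return f"I don't have specific knowledge about '{query}' in my Alexandria library yet. I should expand my research in this area."
--
--     # Build response from knowledge
--     response_parts = [
--         f"Based on my Alexandria knowledge base, here's what I know about '{query}':"
--     ]
--
--     # Group by domain
--     domains_covered = {}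
--     for item in relevant_knowledge:
--         domain = item["domain"]
--         if domain not in domains_covered:
--             domains_covered[domain] = []
--         domains_covered[domain].append(item)
--
--     for domain, items in domains_covered.items():
--         response_parts.append(f"\n**{domain}:**")
--         for item in items:
--             response_parts.append(f"- {item['knowledge_type']} (Priority: {item['priority']})")
--
--     response_parts.append(f"\nI found {len(relevant_knowledge)} relevant knowledge items across {len(domains_covered)} domains.")
--     response_parts.append("My Alexandria library continues to grow with each research session.")
--
--     return "\n".join(response_parts)
-- ===== SOURCE B (Python) =====
-- def generate_knowledge_response(query, relevant_knowledge):
--     if not relevant_knowledge: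
--         return f"I don't have specific knowledge about '{query}' in my Alexandria library yet. I should expand my research in this area."
--     distinct_domains = list(dict.fromkeys(item["domain"] for item in relevant_knowledge))
--     lines = [f"Based on my Alexandria knowledge base, here's what I know about '{query}':"]
--     for domain in distinct_domains:
--         lines.append(f"\n**{domain}:**")
--         lines.extend(f"- {item['knowledge_type']} (Priority: {item['priority']})"
--                      for item in relevant_knowledge if item["domain"] == domain)
--     lines.append(f"\nI found {len(relevant_knowledge)} relevant knowledge items across {len(distinct_domains)} domains.")
--     lines.append("My Alexandria library continues to grow with each research session.")
--     return "\n".join(lines)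
-- ===== Notes on version B (the rewrite author's own statement) =====
-- stated objective: alternative
-- what changed: Replaces A's grouping dict (built by a setdefault-style loop and then iterated) with an ordered dedup of the domain list followed by a per-domain filter pass over the input.
import Mathlib
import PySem

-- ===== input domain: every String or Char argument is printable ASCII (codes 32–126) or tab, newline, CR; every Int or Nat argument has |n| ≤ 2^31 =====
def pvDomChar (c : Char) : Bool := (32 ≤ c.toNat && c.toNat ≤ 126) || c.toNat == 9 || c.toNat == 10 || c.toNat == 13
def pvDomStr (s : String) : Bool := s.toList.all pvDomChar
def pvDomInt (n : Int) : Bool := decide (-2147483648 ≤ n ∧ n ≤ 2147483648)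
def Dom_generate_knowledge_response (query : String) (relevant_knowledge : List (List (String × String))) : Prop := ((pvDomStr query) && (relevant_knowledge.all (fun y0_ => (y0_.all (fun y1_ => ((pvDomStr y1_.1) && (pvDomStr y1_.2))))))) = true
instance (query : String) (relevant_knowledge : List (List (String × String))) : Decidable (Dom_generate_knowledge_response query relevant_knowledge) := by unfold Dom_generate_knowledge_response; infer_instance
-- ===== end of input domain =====

-- B replaces A's grouping dict with an ordered dedup of the domains plus a per-domain filter pass (alternative decomposition, same output).

-- item[k] for an item dict (given as an association list): first build the dict, then look up; "" is never
-- reached inside Pre_ (which demands the key is present).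
def pvKey (item : List (String × String)) (k : String) : String :=
  ((PySem.Dict.ofList item).get? k).getD ""

def pvItemLine (item : List (String × String)) : String :=
  "- " ++ pvKey item "knowledge_type" ++ " (Priority: " ++ pvKey item "priority" ++ ")"

-- ===== PORT A =====
def generate_knowledge_response (query : String) (relevant_knowledge : List (List (String × String))) : String :=
  if relevant_knowledge = [] then
    "I don't have specific knowledge about '" ++ query ++ "' in my Alexandria library yet. I should expand my research in this area."
  else
    let response_parts : List String :=
      ["Based on my Alexandria knowledge base, here's what I know about '" ++ query ++ "':"]
    -- for item in relevant_knowledge: if domain not in domains_covered: … = []; ….append(item)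
    let domains_covered : PySem.Dict String (List (List (String × String))) :=
      relevant_knowledge.foldl (fun d item =>
        let domain := pvKey item "domain"
        let d := if d.contains domain then d else d.insert domain []
        d.insert domain (d.getD domain [] ++ [item])) PySem.Dict.empty
    -- for domain, items in domains_covered.items(): …
    let response_parts :=
      domains_covered.items.foldl (fun ps p =>
        let ps := ps ++ ["\n**" ++ p.1 ++ ":**"]
        p.2.foldl (fun ps item => ps ++ [pvItemLine item]) ps) response_parts
    let response_parts := response_parts ++
      ["\nI found " ++ PySem.Int.toStr relevant_knowledge.length ++ " relevant knowledge items across " ++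
        PySem.Int.toStr domains_covered.size ++ " domains."]
    let response_parts := response_parts ++ ["My Alexandria library continues to grow with each research session."]
    PySem.Str.join "\n" response_parts

-- ===== PORT B =====
def generate_knowledge_response_alt (query : String) (relevant_knowledge : List (List (String × String))) : String :=
  if relevant_knowledge = [] then
    "I don't have specific knowledge about '" ++ query ++ "' in my Alexandria library yet. I should expand my research in this area."
  else
    let distinct_domains := PySem.List.dedup (relevant_knowledge.map (fun item => pvKey item "domain"))
    let lines : List String :=
      ["Based on my Alexandria knowledge base, here's what I know about '" ++ query ++ "':"]
    let lines :=
      distinct_domains.foldl (fun ls domain =>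
        ls ++ ["\n**" ++ domain ++ ":**"] ++
          ((relevant_knowledge.filter (fun item => pvKey item "domain" == domain)).map pvItemLine)) lines
    let lines := lines ++
      ["\nI found " ++ PySem.Int.toStr relevant_knowledge.length ++ " relevant knowledge items across " ++
        PySem.Int.toStr distinct_domains.length ++ " domains."]
    let lines := lines ++ ["My Alexandria library continues to grow with each research session."]
    PySem.Str.join "\n" lines

-- ===== PRECONDITION & SPEC =====
-- Pre_ excludes exactly the inputs where Python A raises KeyError: some item dict lacking one of the
-- keys "domain", "knowledge_type", "priority".
def Pre_generate_knowledge_response (query : String) (relevant_knowledge : List (List (String × String))) : Prop :=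
  relevant_knowledge.all (fun item =>
    (PySem.Dict.ofList item).contains "domain" &&
    (PySem.Dict.ofList item).contains "knowledge_type" &&
    (PySem.Dict.ofList item).contains "priority") = true
instance (query : String) (relevant_knowledge : List (List (String × String))) : Decidable (Pre_generate_knowledge_response query relevant_knowledge) := by unfold Pre_generate_knowledge_response; infer_instance

def pvWitness_generate_knowledge_response : String × (List (List (String × String))) :=
  ("ai", [[("domain", "math"), ("knowledge_type", "fact"), ("priority", "1")],
          [("domain", "math"), ("knowledge_type", "rule"), ("priority", "2")],
          [("domain", "bio"), ("knowledge_type", "fact"), ("priority", "3")]])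

def Spec_generate_knowledge_response (query : String) (relevant_knowledge : List (List (String × String))) (out : String) : Prop := out = generate_knowledge_response_alt query relevant_knowledge
instance (query : String) (relevant_knowledge : List (List (String × String))) (out : String) : Decidable (Spec_generate_knowledge_response query relevant_knowledge out) := by unfold Spec_generate_knowledge_response; infer_instance

-- ===== CLAIM (what is proved, stated in full; the proofs are below) =====
def Claim_equal_generate_knowledge_response : Prop := ∀ (query : String) (relevant_knowledge : List (List (String × String))), Dom_generate_knowledge_response query relevant_knowledge → Pre_generate_knowledge_response query relevant_knowledge → Spec_generate_knowledge_response query relevant_knowledge (generate_knowledge_response query relevant_knowledge)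

-- ===== LEMMAS AND PROOFS =====

-- A's loop body (guard-then-append) is exactly Dict.modify with default [].
lemma pvStepEqModify (d : PySem.Dict String (List (List (String × String)))) (item : List (String × String)) :
    (let domain := pvKey item "domain"
     let d' := if d.contains domain then d else d.insert domain []
     d'.insert domain (d'.getD domain [] ++ [item]))
    = d.modify (pvKey item "domain") [] (· ++ [item]) := by
  by_cases h : d.contains (pvKey item "domain") = true
  · simp [h, PySem.Dict.modify, PySem.Dict.getD_eq_get?_getD]
  · simp [h, PySem.Dict.modify, PySem.Dict.getD_insert_self, PySem.Dict.insert_insert_self,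
      PySem.Dict.getD_of_not_contains]

-- A's grouping dict, characterised: its items are the deduped domains paired with the filters.
lemma pvGroupItems (rk : List (List (String × String))) :
    (rk.foldl (fun d item =>
        let domain := pvKey item "domain"
        let d := if d.contains domain then d else d.insert domain []
        d.insert domain (d.getD domain [] ++ [item])) PySem.Dict.empty).items
    = (PySem.List.dedup (rk.map (fun item => pvKey item "domain"))).map
        (fun c => (c, rk.filter (fun item => pvKey item "domain" == c))) := by
  have hstep : (fun (d : PySem.Dict String (List (List (String × String)))) item =>
      let domain := pvKey item "domain"
      let d := if d.contains domain then d else d.insert domain []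
      d.insert domain (d.getD domain [] ++ [item]))
      = fun d item => d.modify (pvKey item "domain") [] (· ++ [item]) := by
    funext d item; exact pvStepEqModify d item
  rw [hstep]
  have hmap := List.foldl_map (f := fun item : List (String × String) => (pvKey item "domain", item))
      (g := fun (d : PySem.Dict String (List (List (String × String)))) p => d.modify p.1 [] (· ++ [p.2]))
      (l := rk) (init := PySem.Dict.empty)
  have hkeys : (rk.foldl (fun d item => d.modify (pvKey item "domain") [] (· ++ [item]))
        PySem.Dict.empty).keys
      = PySem.List.dedup (rk.map (fun item => pvKey item "domain")) := by
    rw [PySem.Dict.keys_foldl_modify_key rk (fun item => pvKey item "domain")]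
    simp [PySem.Set.update_nil_left]
  have hnd : (rk.foldl (fun d item => d.modify (pvKey item "domain") [] (· ++ [item]))
        PySem.Dict.empty).keys.Nodup :=
    PySem.Dict.nodup_keys_foldl_modify_key rk _ _ _ _ PySem.Dict.nodup_keys_empty
  rw [PySem.Dict.items_eq_map_keys _ hnd ([] : List (List (String × String))), hkeys]
  refine List.map_congr_left (fun c _ => ?_)
  rw [← hmap, PySem.Dict.getD_foldl_modify_append]
  simp [List.filter_map, Function.comp_def]

-- ===== VERDICT (by name: the statement is the Claim_ definition above) =====
theorem generate_knowledge_response_spec : Claim_equal_generate_knowledge_response := by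
  intro query rk _ _
  unfold Spec_generate_knowledge_response generate_knowledge_response generate_knowledge_response_alt
  by_cases hne : rk = []
  · simp [hne]
  · simp only [hne]
    have hsize : (rk.foldl (fun d item =>
          let domain := pvKey item "domain"
          let d := if d.contains domain then d else d.insert domain []
          d.insert domain (d.getD domain [] ++ [item])) PySem.Dict.empty).size
        = (PySem.List.dedup (rk.map (fun item => pvKey item "domain"))).length :=
      (congrArg List.length (pvGroupItems rk)).trans (List.length_map _)
    rw [hsize, pvGroupItems rk, List.foldl_map]
    congr 3
    congr 1
    exact PySem.List.foldl_congr_mem _ _ _ _ (fun ps c _ => by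
      simp [List.append_assoc]
      induction (rk.filter (fun item => pvKey item "domain" == c)) with
      | nil => simp
      | cons h t ih => simp [ih])
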